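-- pv_equiv track=rewrite | github.com/DragynSlayr/CPSC231-Reversi | team_tasks/task4/ScreenState.py | convert_grid_list_to_string
-- ===== SOURCE A (Python) =====
-- def convert_grid_list_to_string(GridStateList):
-- 	#Declare letter, which tracks which letter we are using in the list
-- 	letter = 0
--
-- 	#Declare a variable which will store the string
-- 		#Variable is assigned 'x' in order to mark that this is the first line that characters are added to
-- 	GridStateString = 'x'
--
--
-- 	for line in GridStateList:
-- 		#And for each element in the line list
--
-- 		for location in line:
-- 			#add the character to the string
-- 			GridStateString = GridStateString + location
--
--
-- 			letter = letter+1
--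
-- 			if letter >=8:
-- 				#Mark the change of line with an 'x'
-- 				GridStateString =GridStateString +'x'
--
-- 				#Then reset this counter
-- 				letter = 0
--
-- 	return GridStateString
-- ===== SOURCE B (Python) =====
-- def convert_grid_list_to_string(GridStateList):
--     # Flatten once, then walk fixed-size blocks of 8 cells; an 'x' follows every
--     # complete block (never a final partial one), and the result starts with 'x'.
--     cells = [loc for line in GridStateList for loc in line]
--     result = 'x'
--     for start in range(0, len(cells), 8):
--         chunk = cells[start:start + 8]
--         result += ''.join(chunk)
--         if len(chunk) == 8:
--             result += 'x'
--     return result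
-- ===== Notes on version B (the rewrite author's own statement) =====
-- stated objective: simpler
-- what changed: B flattens the grid once and emits fixed-size blocks of 8 cells directly (appending the line-marker 'x' after each complete block), instead of A's per-character counter threaded through two nested loops.
import Mathlib
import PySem

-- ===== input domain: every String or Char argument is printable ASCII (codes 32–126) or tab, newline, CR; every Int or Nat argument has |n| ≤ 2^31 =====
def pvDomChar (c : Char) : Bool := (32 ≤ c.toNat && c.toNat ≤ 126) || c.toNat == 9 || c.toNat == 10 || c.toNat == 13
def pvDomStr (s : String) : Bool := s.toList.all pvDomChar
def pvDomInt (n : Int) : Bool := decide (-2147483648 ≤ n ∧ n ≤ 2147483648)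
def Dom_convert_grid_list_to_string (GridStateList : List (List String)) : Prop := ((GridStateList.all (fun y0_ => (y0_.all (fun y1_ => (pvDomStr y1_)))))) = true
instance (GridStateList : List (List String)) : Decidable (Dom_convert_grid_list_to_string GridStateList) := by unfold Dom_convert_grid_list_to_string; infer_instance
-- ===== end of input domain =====

-- B flattens the grid once and walks fixed-size blocks of 8 cells, instead of A's per-cell counter.

-- ===== PORT A =====
-- per-cell step: append the cell, bump the counter, after 8 cells append 'x' and reset
def pvAStep (st : Int × String) (location : String) : Int × String :=
  let s := st.2 ++ location
  let letter := st.1 + 1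
  if letter ≥ 8 then (0, s ++ "x") else (letter, s)

def convert_grid_list_to_string (GridStateList : List (List String)) : String :=
  (GridStateList.foldl (fun st line => line.foldl pvAStep st) ((0 : Int), "x")).2

-- ===== PORT B =====
-- one iteration of B's `for start in range(0, len(cells), 8)` loop: cells[start:start+8]
-- is `cells.take 8` of the remaining list, the next iteration sees `cells.drop 8`
def pvBChunks : List String → String
  | [] => ""
  | c :: rest =>
      let cells := c :: rest
      let chunk := cells.take 8
      String.join chunk ++ (if chunk.length = 8 then "x" else "") ++ pvBChunks (cells.drop 8)
termination_by cells => cells.length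
decreasing_by simp [List.length_drop] <;> omega

def convert_grid_list_to_string_alt (GridStateList : List (List String)) : String :=
  "x" ++ pvBChunks (GridStateList.flatMap (fun line => line))

-- ===== PRECONDITION & SPEC =====
def Spec_convert_grid_list_to_string (GridStateList : List (List String)) (out : String) : Prop := out = convert_grid_list_to_string_alt GridStateList
instance (GridStateList : List (List String)) (out : String) : Decidable (Spec_convert_grid_list_to_string GridStateList out) := by unfold Spec_convert_grid_list_to_string; infer_instance

-- ===== CLAIM (what is proved, stated in full; the proofs are below) =====
def Claim_equal_convert_grid_list_to_string : Prop := ∀ (GridStateList : List (List String)), Dom_convert_grid_list_to_string GridStateList → Spec_convert_grid_list_to_string GridStateList (convert_grid_list_to_string GridStateList)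

-- ===== LEMMAS AND PROOFS =====

theorem pvJoin_cons (c : String) (xs : List String) : String.join (c :: xs) = c ++ String.join xs := by
  simp [String.join, List.foldl_cons]
  induction xs generalizing c with
  | nil => simp
  | cons y ys ih => simp [List.foldl_cons, ih (c ++ y), ih y, String.append_assoc]

-- proof-side generalisation of pvBChunks: first chunk has size r+1 (r = 7 - letter)
def pvBAux : Nat → List String → String
  | _, [] => ""
  | r, c :: rest =>
      let cells := c :: rest
      let chunk := cells.take (r + 1)
      String.join chunk ++ (if chunk.length = r + 1 then "x" ++ pvBAux 7 (cells.drop (r + 1)) else "")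
termination_by _ cells => cells.length
decreasing_by simp [List.length_drop] <;> omega

theorem pvBAux_unfold (r : Nat) (cells : List String) :
    pvBAux r cells =
      String.join (cells.take (r + 1)) ++
        (if (cells.take (r + 1)).length = r + 1 then "x" ++ pvBAux 7 (cells.drop (r + 1)) else "") := by
  match cells with
  | [] => simp only [pvBAux, List.take_nil, String.join]; simp
  | c :: rest => simp only [pvBAux]

theorem pvBChunks_unfold (cells : List String) :
    pvBChunks cells =
      String.join (cells.take 8) ++ (if (cells.take 8).length = 8 then "x" else "") ++
        pvBChunks (cells.drop 8) := by
  match cells with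
  | [] => simp only [pvBChunks, List.take_nil, List.drop_nil, String.join]; simp
  | c :: rest => simp only [pvBChunks, String.append_assoc]

theorem pvBChunks_eq_aux (cells : List String) : pvBChunks cells = pvBAux 7 cells := by
  rw [pvBChunks_unfold, pvBAux_unfold]
  by_cases h : (cells.take 8).length = 8
  · have hge : 8 ≤ cells.length := by
      have := List.length_take_le 8 cells
      by_cases hc : 8 ≤ cells.length
      · exact hc
      · rw [List.length_take] at h; omega
    have ih := pvBChunks_eq_aux (cells.drop 8)
    simp [h, ih, String.append_assoc]
  · have hlen : cells.length < 8 := by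
      have := List.length_take_le 8 cells
      by_contra hc
      exact h (List.length_take_of_le (by omega))
    have hd : cells.drop 8 = [] := List.drop_eq_nil_iff.mpr (by omega)
    have h8 : ¬ (8 ≤ cells.length) := by omega
    simp [h8, hd, pvBChunks]
termination_by cells.length
decreasing_by simp [List.length_drop] <;> omega

theorem pvFold_eq_aux (cells : List String) :
    ∀ (l : Int) (s : String), 0 ≤ l → l < 8 →
      (cells.foldl pvAStep (l, s)).2 = s ++ pvBAux (7 - l.toNat) cells := by
  induction cells with
  | nil => intro l s _ _; simp [pvBAux_unfold, String.join]
  | cons c rest ih =>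
      intro l s hl0 hl8
      rw [List.foldl_cons]
      by_cases h7 : l = 7
      · have : pvAStep (l, s) c = (0, s ++ c ++ "x") := by
          simp [pvAStep, h7]
        rw [this, ih 0 (s ++ c ++ "x") (by omega) (by omega)]
        rw [pvBAux_unfold (7 - l.toNat)]
        simp [h7, String.append_assoc, String.join]
      · have hstep : pvAStep (l, s) c = (l + 1, s ++ c) := by
          simp only [pvAStep]
          rw [if_neg (by omega)]
        rw [hstep, ih (l + 1) (s ++ c) (by omega) (by omega)]
        rw [pvBAux_unfold (7 - l.toNat)]
        have hr : 7 - l.toNat = (6 - l.toNat) + 1 := by omega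
        have hr2 : (l + 1).toNat = l.toNat + 1 := by omega
        rw [hr, hr2]
        rw [List.take_succ_cons, List.drop_succ_cons]
        rw [show 7 - (l.toNat + 1) = 6 - l.toNat from by omega]
        rw [pvBAux_unfold (6 - l.toNat)]
        by_cases hlen : (rest.take (6 - l.toNat + 1)).length = 6 - l.toNat + 1 <;>
          simp [hlen, pvJoin_cons, String.append_assoc]

theorem pvNested_eq_flat (G : List (List String)) (st : Int × String) :
    G.foldl (fun st line => line.foldl pvAStep st) st
      = (G.flatMap (fun line => line)).foldl pvAStep st := by
  induction G generalizing st with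
  | nil => simp
  | cons line rest ih => simp [List.flatMap_cons, List.foldl_append, ih]

-- ===== VERDICT (by name: the statement is the Claim_ definition above) =====
theorem convert_grid_list_to_string_spec : Claim_equal_convert_grid_list_to_string := by
  intro G _
  unfold Spec_convert_grid_list_to_string convert_grid_list_to_string convert_grid_list_to_string_alt
  rw [pvNested_eq_flat, pvFold_eq_aux _ 0 "x" (by omega) (by omega), pvBChunks_eq_aux]
  rfl
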